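-- pv_equiv track=rewrite | github.com/Ishikaaa/Sabudh-Foundations | 100 Days Code/Day_021.py | max_col
-- ===== SOURCE A (Python) =====
-- def max_col(test_list):
--     test_list.sort(reverse=True)
--     res=[]
--     m=0
--     len_test_list=len(test_list)
--     while m<len_test_list:
--         a=set([])
--         for i in range(m, len_test_list):
--             a.add(test_list[i][m])
--         res.append(max(a))
--         m+=1
--     return res
-- ===== SOURCE B (Python) =====
-- def max_col(test_list):
--     test_list.sort(reverse=True)
--     n = len(test_list)
--     res = [0] * n
--     for i in range(n):
--         row = test_list[i]
--         for m in range(i + 1):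
--             v = row[m]
--             res[m] = v if i == m else max(res[m], v)
--     return res
-- ===== Notes on version B (the rewrite author's own statement) =====
-- stated objective: alternative
-- what changed: Instead of building a fresh set per column and calling max() over it (independent per-column scans), B makes a single row-major pass that maintains an in-place running-maximum array, seeding column m at row m.
import Mathlib
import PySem

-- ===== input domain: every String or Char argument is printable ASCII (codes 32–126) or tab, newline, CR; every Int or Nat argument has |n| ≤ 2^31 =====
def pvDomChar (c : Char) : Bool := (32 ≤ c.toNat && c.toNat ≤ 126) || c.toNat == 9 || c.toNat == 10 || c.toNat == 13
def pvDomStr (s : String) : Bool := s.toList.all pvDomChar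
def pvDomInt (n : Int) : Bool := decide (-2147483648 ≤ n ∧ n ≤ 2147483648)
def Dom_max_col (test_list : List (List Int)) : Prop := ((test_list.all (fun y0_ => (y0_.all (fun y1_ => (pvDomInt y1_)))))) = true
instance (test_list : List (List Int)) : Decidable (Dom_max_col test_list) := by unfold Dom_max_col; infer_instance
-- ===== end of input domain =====

-- B replaces A's per-column set-building and max() scans by one row-major pass over a running
-- per-column maximum array (same cost class, different traversal; same return value). Both A and
-- B sort the caller's list in place; the equivalence proved here is about the return value.

-- ===== PORT A =====
-- while m < len(test_list): a = set(); for i in range(m, n): a.add(test_list[i][m]); res.append(max(a)); m += 1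
-- max(a) can never see an empty set (the range is nonempty when m < n), so the total `.getD 0` default is never used.
def maxColA_loop (tl : List (List Int)) (n : Nat) (m : Nat) (res : List Int) : List Int :=
  if _h : m < n then
    let a : PySem.Set Int := (PySem.List.pyRange (m : Int) (n : Int) 1).foldl
      (fun s i => PySem.Set.add s (PySem.List.pyGetD (PySem.List.pyGetD tl i []) (m : Int) 0))
      PySem.Set.empty
    maxColA_loop tl n (m + 1) (res ++ [(PySem.List.max? a (fun x => x)).getD 0])
  else res
termination_by n - m

def max_col (test_list : List (List Int)) : List Int :=
  let tl := PySem.List.sorted test_list (fun x => x) true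
  maxColA_loop tl tl.length 0 []

-- ===== PORT B =====
def max_col_alt (test_list : List (List Int)) : List Int :=
  let tl := PySem.List.sorted test_list (fun x => x) true
  let n := tl.length
  (PySem.List.pyRange 0 (n : Int) 1).foldl (fun res i =>
    let row := PySem.List.pyGetD tl i []
    (PySem.List.pyRange 0 (i + 1) 1).foldl (fun res m =>
      let v := PySem.List.pyGetD row m 0
      PySem.List.pySetD res m (if i = m then v else max (PySem.List.pyGetD res m 0) v)) res)
    (List.replicate n 0)

-- ===== PRECONDITION & SPEC =====
-- Pre_ excludes exactly the IndexError inputs of A: column m of row i is read for every i ≥ m,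
-- so after the descending sort the row at position i must have more than i entries.
def Pre_max_col (test_list : List (List Int)) : Prop :=
  ((PySem.List.sorted test_list (fun x => x) true).zipIdx.all
    (fun p => decide (p.2 < p.1.length))) = true

instance (test_list : List (List Int)) : Decidable (Pre_max_col test_list) := by
  unfold Pre_max_col; infer_instance

def pvWitness_max_col : List (List Int) := [[1, 2], [3]]

def Spec_max_col (test_list : List (List Int)) (out : List Int) : Prop := out = max_col_alt test_list
instance (test_list : List (List Int)) (out : List Int) : Decidable (Spec_max_col test_list out) := by
  unfold Spec_max_col; infer_instance

-- ===== CLAIM (what is proved, stated in full; the proofs are below) =====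
def Claim_equal_max_col : Prop := ∀ (test_list : List (List Int)), Dom_max_col test_list → Pre_max_col test_list → Spec_max_col test_list (max_col test_list)

-- ===== LEMMAS AND PROOFS =====

-- value read at row i, column m (getD total form; Pre_ keeps the default unreachable)
def pvVal (tl : List (List Int)) (i m : Nat) : Int := (tl.getD i []).getD m 0

-- max of column m over rows m .. i-1 (seeded at row m)
def pvMax (tl : List (List Int)) (i m : Nat) : Int :=
  ((List.range (i - m - 1)).map (fun k => pvVal tl (m + 1 + k) m)).foldl max (pvVal tl m m)

-- B's state after processing rows 0 .. i-1
def pvState (tl : List (List Int)) (n i : Nat) : List Int :=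
  (List.range n).map (fun m => if m < i then pvMax tl i m else 0)

theorem pvMaxD_eq_of_mem_iff (xs ys : List Int) (hne : xs ≠ [])
    (hmem : ∀ x, x ∈ xs ↔ x ∈ ys) :
    (PySem.List.max? xs (fun x => x)).getD 0 = (PySem.List.max? ys (fun x => x)).getD 0 := by
  obtain ⟨a, ha⟩ := List.exists_mem_of_ne_nil xs hne
  have hyne : ys ≠ [] := by
    intro h; subst h; exact absurd ((hmem a).1 ha) (List.not_mem_nil)
  cases hx : PySem.List.max? xs (fun x => x) with
  | none => exact absurd ((PySem.List.max?_eq_none_iff xs _).mp hx) hne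
  | some u =>
    cases hy : PySem.List.max? ys (fun x => x) with
    | none => exact absurd ((PySem.List.max?_eq_none_iff ys _).mp hy) hyne
    | some v =>
      have h1 : u ≤ v := PySem.List.max?_isMax hy u ((hmem u).1 (PySem.List.max?_mem hx))
      have h2 : v ≤ u := PySem.List.max?_isMax hx v ((hmem v).2 (PySem.List.max?_mem hy))
      simp [le_antisymm h1 h2]

theorem pv_colA (tl : List (List Int)) (n m : Nat) (h : m < n) :
    (PySem.List.max?
      ((PySem.List.pyRange (m : Int) (n : Int) 1).foldl
        (fun s i => PySem.Set.add s (PySem.List.pyGetD (PySem.List.pyGetD tl i []) (m : Int) 0))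
        PySem.Set.empty) (fun x => x)).getD 0 = pvMax tl n m := by
  have hfold : (PySem.List.pyRange (m : Int) (n : Int) 1).foldl
        (fun s i => PySem.Set.add s (PySem.List.pyGetD (PySem.List.pyGetD tl i []) (m : Int) 0))
        PySem.Set.empty
      = PySem.Set.ofList ((PySem.List.pyRange (m : Int) (n : Int) 1).map
          (fun i => PySem.List.pyGetD (PySem.List.pyGetD tl i []) (m : Int) 0)) := by
    rw [PySem.Set.ofList_eq_foldl, List.foldl_map]
    rfl
  rw [hfold]
  have hne : (PySem.List.pyRange (m : Int) (n : Int) 1).map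
      (fun i => PySem.List.pyGetD (PySem.List.pyGetD tl i []) (m : Int) 0) ≠ [] := by
    intro hc
    have := congrArg List.length hc
    simp [PySem.List.length_pyRange_one] at this
    omega
  rw [← pvMaxD_eq_of_mem_iff _ _ hne (fun x => (PySem.Set.mem_ofList _ x).symm)]
  rw [PySem.List.pyRange_one_cons (show (m : Int) < (n : Int) by exact_mod_cast h), List.map_cons,
    PySem.List.max?_id_cons, Option.getD_some]
  rw [PySem.List.pyRange_one ((m : Int) + 1) (n : Int), List.map_map]
  have ht : ((n : Int) - ((m : Int) + 1)).toNat = n - m - 1 := by omega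
  rw [ht]
  unfold pvMax
  have hmap : List.map
      ((fun i => PySem.List.pyGetD (PySem.List.pyGetD tl i []) (m : Int) 0) ∘ fun k : Nat => (m : Int) + 1 + (k : Int))
      (List.range (n - m - 1))
      = List.map (fun k => pvVal tl (m + 1 + k) m) (List.range (n - m - 1)) := by
    apply List.map_congr_left
    intro k _
    have hcast : (m : Int) + 1 + (k : Int) = ((m + 1 + k : Nat) : Int) := by push_cast; ring
    simp only [Function.comp_apply, hcast, PySem.List.pyGetD_natCast, pvVal]
  have hinit : PySem.List.pyGetD (PySem.List.pyGetD tl (m : Int) []) (m : Int) 0 = pvVal tl m m := by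
    simp only [PySem.List.pyGetD_natCast, pvVal]
  rw [hmap, hinit]

theorem pv_loopA (tl : List (List Int)) (n : Nat) :
    ∀ (d m : Nat) (res : List Int), n - m = d →
      maxColA_loop tl n m res = res ++ (List.range' m d).map (pvMax tl n) := by
  intro d
  induction d with
  | zero =>
    intro m res hd
    rw [maxColA_loop]
    have hnm : ¬ m < n := by omega
    simp [hnm]
  | succ d ih =>
    intro m res hd
    have hm : m < n := by omega
    rw [maxColA_loop]
    simp only [hm, dif_pos]
    rw [ih (m + 1) _ (by omega), pv_colA tl n m hm, List.range'_succ, List.map_cons]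
    simp

theorem pv_setFold (f : Nat → Int → Int) (k : Nat) (res : List Int) :
    (List.range k).foldl (fun r m => r.set m (f m (r.getD m 0))) res
      = res.mapIdx (fun j x => if j < k then f j x else x) := by
  induction k with
  | zero =>
    apply List.ext_getElem
    · simp
    · intro q h1 h2; simp [List.getElem_mapIdx]
  | succ n ih =>
    rw [List.range_succ, List.foldl_append, ih]
    apply List.ext_getElem
    · simp
    · intro q hq1 hq2
      simp only [List.length_set, List.length_mapIdx, List.foldl_cons, List.foldl_nil] at hq1 hq2 ⊢
      have hql : q < res.length := by simpa using hq2
      by_cases hqn : q = n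
      · subst hqn
        rw [List.getElem_set_self (by simpa using hql),
            List.getD_eq_getElem _ _ (by simpa using hql), List.getElem_mapIdx,
            List.getElem_mapIdx]
        simp
      · rw [List.getElem_set_ne (by omega), List.getElem_mapIdx, List.getElem_mapIdx]
        by_cases h : q < n
        · simp [h, show q < n + 1 by omega]
        · simp [h, show ¬ q < n + 1 by omega]

theorem pvMax_self (tl : List (List Int)) (i : Nat) : pvMax tl (i + 1) i = pvVal tl i i := by
  simp [pvMax]

theorem pvMax_succ (tl : List (List Int)) (i j : Nat) (h : j < i) :
    pvMax tl (i + 1) j = max (pvMax tl i j) (pvVal tl i j) := by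
  unfold pvMax
  have h1 : i + 1 - j - 1 = (i - j - 1) + 1 := by omega
  have h2 : j + 1 + (i - j - 1) = i := by omega
  rw [h1, List.range_succ, List.map_append, List.foldl_append]
  simp [h2]

theorem pv_step (tl : List (List Int)) (n i : Nat) (h : i < n) :
    (List.range (i + 1)).foldl
      (fun r m => r.set m (if i = m then pvVal tl i m else max (r.getD m 0) (pvVal tl i m)))
      (pvState tl n i) = pvState tl n (i + 1) := by
  rw [pv_setFold (fun m x => if i = m then pvVal tl i m else max x (pvVal tl i m))]
  apply List.ext_getElem
  · simp [pvState]
  · intro q hq1 hq2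
    simp only [pvState, List.getElem_mapIdx, List.getElem_map, List.getElem_range,
      List.length_mapIdx, List.length_map, List.length_range] at hq1 hq2 ⊢
    by_cases hqi : q = i
    · subst hqi
      simp [pvMax_self, show q < q + 1 by omega]
    · by_cases hql : q < i
      · simp [show q < i + 1 by omega, hql, Ne.symm hqi, pvMax_succ tl i q hql]
      · simp [show ¬ q < i + 1 by omega, hql]

theorem pv_outer (tl : List (List Int)) (n : Nat) :
    ∀ k, k ≤ n → (List.range k).foldl
      (fun res i => (List.range (i + 1)).foldl
        (fun r m => r.set m (if i = m then pvVal tl i m else max (r.getD m 0) (pvVal tl i m))) res)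
      (List.replicate n 0) = pvState tl n k := by
  intro k
  induction k with
  | zero =>
    intro _
    apply List.ext_getElem
    · simp [pvState]
    · intro q hq1 hq2
      simp [pvState]
  | succ k ih =>
    intro hk
    rw [List.range_succ, List.foldl_append, ih (by omega)]
    simpa using pv_step tl n k (by omega)

theorem pv_B_eq (tl : List (List Int)) :
    (PySem.List.pyRange 0 (tl.length : Int) 1).foldl (fun res i =>
      let row := PySem.List.pyGetD tl i []
      (PySem.List.pyRange 0 (i + 1) 1).foldl (fun res m =>
        let v := PySem.List.pyGetD row m 0
        PySem.List.pySetD res m (if i = m then v else max (PySem.List.pyGetD res m 0) v)) res)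
      (List.replicate tl.length 0)
    = (List.range tl.length).map (pvMax tl tl.length) := by
  have houter : ∀ (res : List Int) (i : Nat),
      (PySem.List.pyRange 0 ((i : Int) + 1) 1).foldl (fun res m =>
        PySem.List.pySetD res m (if (i : Int) = m
          then PySem.List.pyGetD (PySem.List.pyGetD tl (i : Int) []) m 0
          else max (PySem.List.pyGetD res m 0) (PySem.List.pyGetD (PySem.List.pyGetD tl (i : Int) []) m 0))) res
      = (List.range (i + 1)).foldl
        (fun r m => r.set m (if i = m then pvVal tl i m else max (r.getD m 0) (pvVal tl i m))) res := by
    intro res i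
    have hcast : ((i : Int) + 1) = ((i + 1 : Nat) : Int) := by push_cast; ring
    rw [hcast, PySem.List.pyRange_zero_nat, List.foldl_map]
    apply PySem.List.foldl_congr_mem
    intro acc m _
    simp [pvVal, Nat.cast_inj]
  rw [PySem.List.pyRange_zero_nat, List.foldl_map]
  calc (List.range tl.length).foldl _ (List.replicate tl.length 0)
      = (List.range tl.length).foldl
        (fun res i => (List.range (i + 1)).foldl
          (fun r m => r.set m (if i = m then pvVal tl i m else max (r.getD m 0) (pvVal tl i m))) res)
        (List.replicate tl.length 0) := by
        apply PySem.List.foldl_congr_mem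
        intro acc i _
        exact houter acc i
    _ = pvState tl tl.length tl.length := pv_outer tl tl.length tl.length (le_refl _)
    _ = (List.range tl.length).map (pvMax tl tl.length) := by
        apply List.map_congr_left
        intro m hm
        simp [List.mem_range] at hm
        simp [hm]


-- ===== VERDICT (by name: the statement is the Claim_ definition above) =====
theorem max_col_spec : Claim_equal_max_col := by
  intro test_list _dom _pre
  unfold Spec_max_col max_col max_col_alt
  rw [pv_loopA (PySem.List.sorted test_list (fun x => x) true)
        (PySem.List.sorted test_list (fun x => x) true).length
        (PySem.List.sorted test_list (fun x => x) true).length 0 [] (by omega),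
      pv_B_eq]
  simp [List.range_eq_range']
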